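-- pv_equiv track=rewrite | github.com/yangjung-woo/KT-Workspace | KT_coding_masters/프로그래머스 스터디/level2_sliceNN.py | solution
-- ===== SOURCE A (Python) =====
-- def solution(n, left, right):
--     answer =[]
--     for i in range(left, right+1):
--         y = i //n # 몫은 y 좌표
--         x = i % n # 나머지는 x좌표
--         ans = max(x,y)+1
--         answer.append(ans)
--     return answer
-- ===== SOURCE B (Python) =====
-- def solution(n, left, right):
--     # Row-structured: walk the grid rows that intersect [left, right] and emit
--     # each row's column segment directly from its (x, y) coordinates.
--     if left > right:
--         return []
--     out = []
--     for y in range(left // n, right // n + 1):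
--         row_start = y * n
--         lo = max(left - row_start, 0)
--         hi = min(right - row_start, n - 1)
--         for x in range(lo, hi + 1):
--             out.append(max(x, y) + 1)
--     return out
-- ===== Notes on version B (the rewrite author's own statement) =====
-- stated objective: alternative
-- what changed: A makes one linear pass over [left,right] computing a floor division and a modulo per index; B decomposes the range by grid rows (nested loops: rows, then the column segment of each row), reading each value straight off its (x,y) coordinates with no per-element division. …
-- outside the precondition, e.g. on solution(-3, 0, 2): A returns [1, 0, 0], B returns []
import Mathlib
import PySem

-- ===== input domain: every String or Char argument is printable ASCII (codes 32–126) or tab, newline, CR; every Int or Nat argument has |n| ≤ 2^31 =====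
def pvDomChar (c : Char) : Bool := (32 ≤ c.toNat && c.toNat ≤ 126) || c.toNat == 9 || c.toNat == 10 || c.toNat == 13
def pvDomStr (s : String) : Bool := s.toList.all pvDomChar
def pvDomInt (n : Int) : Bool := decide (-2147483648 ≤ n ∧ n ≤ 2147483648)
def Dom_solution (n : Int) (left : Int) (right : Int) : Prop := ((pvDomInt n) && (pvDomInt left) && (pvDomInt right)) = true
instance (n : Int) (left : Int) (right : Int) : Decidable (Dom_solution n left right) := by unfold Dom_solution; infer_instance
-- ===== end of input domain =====

-- B replaces A's single index pass (a floor division and a modulo per element) by a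
-- row decomposition of the grid: nested loops over rows and column segments
-- (objective: alternative).

-- ===== PORT A =====
def solution (n : Int) (left : Int) (right : Int) : List Int :=
  ((PySem.List.pyRange left (right + 1) 1).foldl
    (fun answer i =>
      let y := PySem.Int.floordiv i n
      let x := PySem.Int.mod i n
      let ans := max x y + 1
      answer.push ans) #[]).toList

-- ===== PORT B =====
def solution_alt (n : Int) (left : Int) (right : Int) : List Int :=
  if left > right then []
  else
  ((PySem.List.pyRange (PySem.Int.floordiv left n) (PySem.Int.floordiv right n + 1) 1).foldl
    (fun out y =>
      let rowStart := y * n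
      let lo := max (left - rowStart) 0
      let hi := min (right - rowStart) (n - 1)
      (PySem.List.pyRange lo (hi + 1) 1).foldl (fun o x => o.push (max x y + 1)) out) #[]).toList

-- ===== PRECONDITION & SPEC =====
-- Pre_ restricts to the problem's natural domain n ≥ 1, plus the empty request
-- right < left for any nonzero n (where both programs return []); it excludes
-- n = 0 (A raises ZeroDivisionError unless the range is empty, B's division raises)
-- and nonempty requests with a negative grid size, which are outside the task's
-- meaning (A's values there are floor-division artefacts).
def Pre_solution (n : Int) (left : Int) (right : Int) : Prop := 1 ≤ n ∨ (n ≠ 0 ∧ right < left)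
instance (n : Int) (left : Int) (right : Int) : Decidable (Pre_solution n left right) := by unfold Pre_solution; infer_instance
def pvWitness_solution : Int × Int × Int := (3, 2, 8)

def Spec_solution (n : Int) (left : Int) (right : Int) (out : List Int) : Prop := out = solution_alt n left right
instance (n : Int) (left : Int) (right : Int) (out : List Int) : Decidable (Spec_solution n left right out) := by unfold Spec_solution; infer_instance

-- ===== CLAIM (what is proved, stated in full; the proofs are below) =====
def Claim_equal_solution : Prop := ∀ (n : Int) (left : Int) (right : Int), Dom_solution n left right → Pre_solution n left right → Spec_solution n left right (solution n left right)

-- ===== LEMMAS AND PROOFS =====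

-- A's per-index value
def valA (n i : Int) : Int := max (PySem.Int.mod i n) (PySem.Int.floordiv i n) + 1

-- B's segment for row y
def rowSeg (n left right y : Int) : List Int :=
  (PySem.List.pyRange (max (left - y * n) 0) (min (right - y * n) (n - 1) + 1) 1).map
    (fun x => max x y + 1)

-- uniqueness of Python floordiv/mod for a positive divisor
lemma fm_unique_pos (n a q r : Int) (hn : 0 < n) (h : q * n + r = a) (h0 : 0 ≤ r) (h1 : r < n) :
    PySem.Int.floordiv a n = q ∧ PySem.Int.mod a n = r := by
  rw [PySem.Int.floordiv_eq_ediv_of_pos hn, PySem.Int.mod_eq_emod_of_pos hn]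
  exact (Int.ediv_emod_unique hn).mpr ⟨by linear_combination h, h0, h1⟩

lemma floordiv_bounds (n a : Int) (hn : 0 < n) :
    (PySem.Int.floordiv a n) * n ≤ a ∧ a < (PySem.Int.floordiv a n) * n + n := by
  have h := PySem.Int.floordiv_mul_add_mod a n
  have h0 := PySem.Int.mod_nonneg a hn
  have h1 := PySem.Int.mod_lt a hn
  set t := PySem.Int.floordiv a n * n with ht
  omega

lemma floordiv_mono (n a b : Int) (hn : 0 < n) (hab : a ≤ b) :
    PySem.Int.floordiv a n ≤ PySem.Int.floordiv b n := by
  rw [PySem.Int.floordiv_eq_ediv_of_pos hn, PySem.Int.floordiv_eq_ediv_of_pos hn]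
  exact Int.ediv_le_ediv hn hab

lemma foldl_push_toList (g : Int → Int) (l : List Int) (acc : Array Int) :
    (l.foldl (fun o x => o.push (g x)) acc).toList = acc.toList ++ l.map g := by
  induction l generalizing acc with
  | nil => simp
  | cons h t ih => simp [List.foldl_cons]

-- A is the range map of valA
lemma solution_eq_map (n left right : Int) :
    solution n left right = (PySem.List.pyRange left (right + 1) 1).map (valA n) := by
  show ((PySem.List.pyRange left (right + 1) 1).foldl
      (fun a i => a.push (max (PySem.Int.mod i n) (PySem.Int.floordiv i n) + 1)) #[]).toList = _
  rw [foldl_push_toList (fun i => max (PySem.Int.mod i n) (PySem.Int.floordiv i n) + 1)]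
  simp [valA]

-- B is the flatMap of its row segments
lemma alt_eq_flatMap (n left right : Int) (h : ¬ left > right) :
    solution_alt n left right
      = (PySem.List.pyRange (PySem.Int.floordiv left n) (PySem.Int.floordiv right n + 1) 1).flatMap
          (rowSeg n left right) := by
  unfold solution_alt
  rw [if_neg h]
  have key : ∀ (l : List Int) (acc : Array Int),
      (l.foldl (fun out y =>
        (PySem.List.pyRange (max (left - y * n) 0) (min (right - y * n) (n - 1) + 1) 1).foldl
          (fun o x => o.push (max x y + 1)) out) acc).toList
        = acc.toList ++ l.flatMap (rowSeg n left right) := by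
    intro l
    induction l with
    | nil => simp
    | cons h t ih =>
      intro acc
      simp only [List.foldl_cons, List.flatMap_cons]
      rw [ih, foldl_push_toList (fun x => max x h + 1)]
      simp [rowSeg, List.append_assoc]
  rw [key]
  simp

lemma flatMap_congr_mem {α β : Type} {l : List α} {f g : α → List β}
    (h : ∀ a ∈ l, f a = g a) : l.flatMap f = l.flatMap g := by
  induction l with
  | nil => rfl
  | cons x t ih =>
    simp only [List.flatMap_cons]
    rw [h x (by simp), ih (fun a ha => h a (by simp [ha]))]

lemma pyRange_shift (a b c : Int) :
    PySem.List.pyRange (a + c) (b + c) 1 = (PySem.List.pyRange a b 1).map (· + c) := by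
  rw [PySem.List.pyRange_one, PySem.List.pyRange_one, List.map_map]
  have hh : b + c - (a + c) = b - a := by ring
  rw [hh]
  apply List.map_congr_left
  intro k _
  simp
  ring

-- one in-row chunk of A's range map is a shifted column map
lemma chunk (n L a b : Int) (hn : 0 < n) (h1 : L * n ≤ a) (h2 : b ≤ L * n + n) :
    (PySem.List.pyRange a b 1).map (valA n)
      = (PySem.List.pyRange (a - L * n) (b - L * n) 1).map (fun x => max x L + 1) := by
  have hs : PySem.List.pyRange a b 1
      = (PySem.List.pyRange (a - L * n) (b - L * n) 1).map (· + L * n) := by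
    have := pyRange_shift (a - L * n) (b - L * n) (L * n)
    simpa using this
  rw [hs, List.map_map]
  apply List.map_congr_left
  intro x hx
  rw [PySem.List.mem_pyRange_one] at hx
  have hx0 : 0 ≤ x := by omega
  have hxn : x < n := by omega
  have h := fm_unique_pos n (x + L * n) L x hn (by ring) hx0 hxn
  simp [valA, h.1, h.2]

-- row-by-row equality, by induction on the number of rows
lemma rows_eq (n : Int) (hn : 0 < n) : ∀ (k : Nat) (left right : Int),
    PySem.Int.floordiv right n = PySem.Int.floordiv left n + k → left ≤ right →
    (PySem.List.pyRange left (right + 1) 1).map (valA n)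
      = (PySem.List.pyRange (PySem.Int.floordiv left n) (PySem.Int.floordiv right n + 1) 1).flatMap
          (rowSeg n left right) := by
  intro k
  induction k with
  | zero =>
    intro left right hk hlr
    set L := PySem.Int.floordiv left n with hL
    have hR : PySem.Int.floordiv right n = L := by simpa using hk
    have hbl' : L * n ≤ left ∧ left < L * n + n := by
      rw [hL]; exact floordiv_bounds n left hn
    have hbr' : L * n ≤ right ∧ right < L * n + n := by
      rw [← hR]; exact floordiv_bounds n right hn
    have hbl := hbl'
    have hbr := hbr'
    rw [hR, PySem.List.pyRange_one_singleton, List.flatMap_cons, List.flatMap_nil, List.append_nil]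
    rw [chunk n L left (right + 1) hn (by omega) (by omega)]
    unfold rowSeg
    rw [max_eq_left (by omega : (0:Int) ≤ left - L * n),
        min_eq_left (by omega : right - L * n ≤ n - 1)]
    have : right + 1 - L * n = right - L * n + 1 := by ring
    rw [this]
  | succ k ih =>
    intro left right hk hlr
    set L := PySem.Int.floordiv left n with hL
    set R := PySem.Int.floordiv right n with hR
    have hbl := floordiv_bounds n left hn
    have hbr := floordiv_bounds n right hn
    rw [← hL] at hbl
    rw [← hR] at hbr
    have hLR : L + 1 ≤ R := by omega
    have hmn : (L + 1) * n ≤ R * n :=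
      Int.mul_le_mul_of_nonneg_right hLR (le_of_lt hn)
    have hmr : (L + 1) * n ≤ right := by nlinarith
    have hlm : left ≤ (L + 1) * n := by nlinarith
    -- split A's range at the row boundary
    rw [PySem.List.pyRange_one_append left ((L + 1) * n) (right + 1) hlm (by omega),
        List.map_append]
    -- first row
    have hfd : PySem.Int.floordiv ((L + 1) * n) n = L + 1 :=
      (fm_unique_pos n ((L + 1) * n) (L + 1) 0 hn (by ring) le_rfl hn).1
    have hrest := ih ((L + 1) * n) right (by rw [hfd]; omega) hmr
    rw [hfd] at hrest
    rw [hrest]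
    rw [PySem.List.pyRange_one_cons (show L < R + 1 by omega), List.flatMap_cons]
    congr 1
    · -- first chunk = first row segment
      rw [chunk n L left ((L + 1) * n) hn (by omega) (by nlinarith)]
      unfold rowSeg
      rw [max_eq_left (by omega : (0:Int) ≤ left - L * n),
          min_eq_right (by nlinarith : (n:Int) - 1 ≤ right - L * n)]
      have h1 : (L + 1) * n - L * n = n := by ring
      have h2 : n - 1 + 1 = n := by ring
      rw [h1, h2]
    · -- later rows do not see `left`
      apply flatMap_congr_mem
      intro y hy
      rw [PySem.List.mem_pyRange_one] at hy
      have hyn : (L + 1) * n ≤ y * n :=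
        Int.mul_le_mul_of_nonneg_right (by omega) (le_of_lt hn)
      unfold rowSeg
      rw [max_eq_right (by omega : left - y * n ≤ 0),
          max_eq_right (by omega : (L + 1) * n - y * n ≤ 0)]

-- ===== VERDICT (by name: the statement is the Claim_ definition above) =====
theorem solution_spec : Claim_equal_solution := by
  intro n left right _ hpre
  unfold Spec_solution
  by_cases hlr : right < left
  · -- empty request: both sides are []
    rw [solution_eq_map, PySem.List.pyRange_one_eq_nil (by omega : right + 1 ≤ left),
        List.map_nil]
    unfold solution_alt
    rw [if_pos (by omega : left > right)]
  · have hn : 1 ≤ n := by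
      rcases hpre with h | h
      · exact h
      · omega
    have hn0 : (0:Int) < n := hn
    rw [solution_eq_map, alt_eq_flatMap n left right (by omega)]
    have hm := floordiv_mono n left right hn0 (by omega)
    exact rows_eq n hn0 ((PySem.Int.floordiv right n - PySem.Int.floordiv left n).toNat)
      left right (by omega) (by omega)
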